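-- pv_equiv track=rewrite | github.com/GolpalaSandeep/Pythoncodes | arrayp2.py | small_big
-- ===== SOURCE A (Python) =====
-- def small_big(arr):
--    smallest_v=biggest_v=arr[0]
--    for j in range(5):
--       if(arr[j]<smallest_v):
--          smallest_v=arr[j]
--       if(arr[j]>biggest_v):
--          biggest_v=arr[j]
--    return smallest_v,biggest_v
-- ===== SOURCE B (Python) =====
-- def _insert(x, s):
--     # insert x into sorted list s, keeping it sorted (stable: after equals)
--     if not s or x < s[0]:
--         return [x] + s
--     return [s[0]] + _insert(x, s[1:])
--
-- def small_big(arr):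
--     s = []
--     for j in range(5):
--         s = _insert(arr[j], s)
--     return s[0], s[-1]
-- ===== Notes on version B (the rewrite author's own statement) =====
-- stated objective: alternative
-- what changed: Replaces A's single pass maintaining two running extrema with an insertion sort of the first five elements followed by reading off the ends of the sorted list.
import Mathlib
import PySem

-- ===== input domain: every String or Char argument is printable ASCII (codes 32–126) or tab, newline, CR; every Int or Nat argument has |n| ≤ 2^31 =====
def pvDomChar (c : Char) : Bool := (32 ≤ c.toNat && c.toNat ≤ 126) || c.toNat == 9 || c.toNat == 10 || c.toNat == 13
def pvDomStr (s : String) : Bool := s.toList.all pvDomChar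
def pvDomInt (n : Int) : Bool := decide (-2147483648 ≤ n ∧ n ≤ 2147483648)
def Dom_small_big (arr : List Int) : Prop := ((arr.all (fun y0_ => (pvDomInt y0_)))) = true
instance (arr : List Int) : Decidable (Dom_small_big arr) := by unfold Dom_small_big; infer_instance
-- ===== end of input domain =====

-- B insertion-sorts the first five elements and reads the ends of the sorted list, instead of A's single pass with two running extrema (alternative algorithm).


-- ===== PORT A =====
def small_big (arr : List Int) : Int × Int :=
  let v0 := PySem.List.pyGetD arr 0 0
  (PySem.List.pyRange 0 5 1).foldl
    (fun (st : Int × Int) j =>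
      let aj := PySem.List.pyGetD arr j 0
      let s := if aj < st.1 then aj else st.1
      let b := if aj > st.2 then aj else st.2
      (s, b))
    (v0, v0)

-- ===== PORT B =====
-- _insert x s : insert x into sorted list s, keeping it sorted
def pvInsert (x : Int) : List Int → List Int
  | [] => [x]
  | h :: t => if x < h then x :: h :: t else h :: pvInsert x t

def small_big_alt (arr : List Int) : Int × Int :=
  let s := (PySem.List.pyRange 0 5 1).foldl
    (fun s j => pvInsert (PySem.List.pyGetD arr j 0) s) []
  (PySem.List.pyGetD s 0 0, PySem.List.pyGetD s (-1) 0)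

-- ===== PRECONDITION & SPEC =====
-- Pre_ excludes lists with fewer than 5 elements, on which A raises IndexError.
def Pre_small_big (arr : List Int) : Prop := 5 ≤ arr.length
instance (arr : List Int) : Decidable (Pre_small_big arr) := by unfold Pre_small_big; infer_instance
def pvWitness_small_big : List Int := [3, -1, 4, 1, 5]
def Spec_small_big (arr : List Int) (out : Int × Int) : Prop := out = small_big_alt arr
instance (arr : List Int) (out : Int × Int) : Decidable (Spec_small_big arr out) := by unfold Spec_small_big; infer_instance

-- ===== CLAIM =====
def Claim_equal_small_big : Prop := ∀ (arr : List Int), Dom_small_big arr → Pre_small_big arr → Spec_small_big arr (small_big arr)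

-- ===== LEMMAS AND PROOFS =====

theorem mem_pvInsert (y x : Int) (s : List Int) : y ∈ pvInsert x s ↔ y = x ∨ y ∈ s := by
  induction s with
  | nil => simp [pvInsert]
  | cons h t ih =>
    simp only [pvInsert]
    split_ifs <;> simp [ih] <;> tauto

theorem pvInsert_ne_nil (x : Int) (s : List Int) : pvInsert x s ≠ [] := by
  cases s with
  | nil => simp [pvInsert]
  | cons h t => simp only [pvInsert]; split_ifs <;> simp

theorem sorted_head_le_getLast (h2 : Int) (t : List Int) (hi : Int)
    (hs : (h2 :: t).Pairwise (· ≤ ·)) (hl : (h2 :: t).getLast? = some hi) : h2 ≤ hi := by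
  induction t generalizing h2 with
  | nil => simp at hl; omega
  | cons h3 t' ih =>
    have h23 : h2 ≤ h3 := (List.pairwise_cons.mp hs).1 h3 (by simp)
    have := ih h3 (List.Pairwise.of_cons hs) (by simpa using hl)
    omega

theorem pvInsert_spec (x : Int) (s : List Int) (lo hi : Int)
    (hs : s.Pairwise (· ≤ ·)) (hh : s.head? = some lo) (hl : s.getLast? = some hi) :
    (pvInsert x s).Pairwise (· ≤ ·) ∧ (pvInsert x s).head? = some (min x lo)
      ∧ (pvInsert x s).getLast? = some (max x hi) := by
  induction s generalizing lo with
  | nil => simp at hh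
  | cons h t ih =>
    have hlo : lo = h := by simp at hh; omega
    subst hlo
    by_cases hx : x < lo
    · have hle : lo ≤ hi := sorted_head_le_getLast lo t hi hs hl
      refine ⟨?_, ?_, ?_⟩
      · simp only [pvInsert, if_pos hx]
        refine List.pairwise_cons.mpr ⟨?_, hs⟩
        intro y hy
        rcases List.mem_cons.mp hy with h1 | h1
        · omega
        · have := List.rel_of_pairwise_cons hs h1; omega
      · simp only [pvInsert, if_pos hx, List.head?_cons]
        congr 1; omega
      · simp only [pvInsert, if_pos hx]
        rw [List.getLast?_cons_cons, hl]
        congr 1; omega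
    · cases t with
      | nil =>
        have hhi : hi = lo := by simp at hl; omega
        subst hhi
        refine ⟨?_, ?_, ?_⟩
        · simp only [pvInsert, if_neg hx]
          simp; omega
        · simp only [pvInsert, if_neg hx, List.head?_cons]
          congr 1; omega
        · simp only [pvInsert, if_neg hx]
          simp; omega
      | cons h2 t' =>
        have hs' : (h2 :: t').Pairwise (· ≤ ·) := List.Pairwise.of_cons hs
        have hl' : (h2 :: t').getLast? = some hi := by simpa using hl
        obtain ⟨ihp, ihh, ihl⟩ := ih (lo := h2) (hs := hs') (hh := rfl) (hl := hl')
        refine ⟨?_, ?_, ?_⟩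
        · simp only [pvInsert, if_neg hx]
          refine List.pairwise_cons.mpr ⟨?_, ihp⟩
          intro y hy
          rcases (mem_pvInsert y x (h2 :: t')).mp hy with h1 | h1
          · omega
          · exact List.rel_of_pairwise_cons hs h1
        · simp only [pvInsert, if_neg hx, List.head?_cons]
          congr 1; omega
        · simp only [pvInsert, if_neg hx]
          rw [List.getLast?_cons,
            show (if x < h2 then x :: h2 :: t' else h2 :: pvInsert x t') = pvInsert x (h2 :: t')
              from by simp [pvInsert], ihl]
          simp

theorem if_min (a b : Int) : (if a < b then a else b) = min a b := by
  split_ifs <;> omega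

theorem if_max (a b : Int) : (if a > b then a else b) = max a b := by
  split_ifs <;> omega

-- ===== VERDICT =====
theorem small_big_spec : Claim_equal_small_big := by
  intro arr _ hpre
  unfold Pre_small_big at hpre
  match arr, hpre with
  | a :: b :: c :: d :: e :: rest, _ =>
    show Spec_small_big _ _
    unfold Spec_small_big small_big small_big_alt
    have hr : PySem.List.pyRange 0 5 1 = [0, 1, 2, 3, 4] := by decide
    have hg0 : PySem.List.pyGetD (a :: b :: c :: d :: e :: rest) 0 0 = a := by
      simp [PySem.List.pyGetD, PySem.List.pyGet?, PySem.List.pyIdx?]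
      rw [if_pos (by omega)]
      simp
    have hg1 : PySem.List.pyGetD (a :: b :: c :: d :: e :: rest) 1 0 = b := by
      simp [PySem.List.pyGetD, PySem.List.pyGet?, PySem.List.pyIdx?]
      rw [if_pos (by omega)]
      simp
    have hg2 : PySem.List.pyGetD (a :: b :: c :: d :: e :: rest) 2 0 = c := by
      simp [PySem.List.pyGetD, PySem.List.pyGet?, PySem.List.pyIdx?]
      rw [if_pos (by omega)]
      simp
    have hg3 : PySem.List.pyGetD (a :: b :: c :: d :: e :: rest) 3 0 = d := by
      simp [PySem.List.pyGetD, PySem.List.pyGet?, PySem.List.pyIdx?]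
      rw [if_pos (by omega)]
      simp
    have hg4 : PySem.List.pyGetD (a :: b :: c :: d :: e :: rest) 4 0 = e := by
      simp [PySem.List.pyGetD, PySem.List.pyGet?, PySem.List.pyIdx?]
      rw [if_pos (by omega)]
      simp
    simp only [hr, List.foldl, hg0, hg1, hg2, hg3, hg4, if_min, if_max]
    -- B side: characterise the sorted list built by the five inserts
    have t1 : (pvInsert a []).Pairwise (· ≤ ·) ∧ (pvInsert a []).head? = some (min a a)
        ∧ (pvInsert a []).getLast? = some (max a a) := by
      simp [pvInsert]
    obtain ⟨p1, hh1, hl1⟩ := t1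
    obtain ⟨p2, hh2, hl2⟩ := pvInsert_spec b _ _ _ p1 hh1 hl1
    obtain ⟨p3, hh3, hl3⟩ := pvInsert_spec c _ _ _ p2 hh2 hl2
    obtain ⟨p4, hh4, hl4⟩ := pvInsert_spec d _ _ _ p3 hh3 hl3
    obtain ⟨p5, hh5, hl5⟩ := pvInsert_spec e _ _ _ p4 hh4 hl4
    set s5 := pvInsert e (pvInsert d (pvInsert c (pvInsert b (pvInsert a [])))) with hs5
    cases hcase : s5 with
    | nil => exact absurd hcase (pvInsert_ne_nil _ _)
    | cons m tl =>
      rw [hcase] at hh5 hl5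
      have hm : m = min e (min d (min c (min b (min a a)))) := by
        simp at hh5; omega
      have hgl : (m :: tl).getLast? = some (max e (max d (max c (max b (max a a))))) := hl5
      have hgd0 : PySem.List.pyGetD (m :: tl) 0 0 = m := by
        simp [PySem.List.pyGetD, PySem.List.pyGet?, PySem.List.pyIdx?]
      have hgdl : PySem.List.pyGetD (m :: tl) (-1) 0
          = max e (max d (max c (max b (max a a)))) := by
        rw [PySem.List.pyGetD_neg_one (m :: tl) 0 (by simp)]
        rw [List.getLast?_eq_some_getLast (by simp)] at hgl
        exact Option.some_injective _ hgl
      rw [hgd0, hgdl, hm]
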